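-- pv_equiv track=rewrite | github.com/Loscutik/sp500-strategies | scripts/helpers.py | extract_capitals_with_following
-- ===== SOURCE A (Python) =====
-- def extract_capitals_with_following(s, n=3):
--     """
--     Extracts substrings from the input string `s` starting at each uppercase letter and including up to `n` characters
--     or until the next uppercase letter is encountered.
--
--     Args:
--         s (str): The input string to process.
--         n (int, optional): The number of characters to include after each uppercase letter. Defaults to 3.
--
--     Returns:
--         str: A concatenated string of the extracted substrings. If no uppercase letters are found, returns the original string.
--     """
--     result = []
--     capitals =[]
--     i = 0
--     while i < len(s):
--         if s[i].isupper():
--             capitals.append(i)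
--         i += 1
--     if len(capitals) == 0:
--         return s
--     capitals.append(len(s))
--     for idx in range(len(capitals)-1):
--         left=capitals[idx]
--         right=min(left+n, capitals[idx+1])
--         result.append(s[left:right])
--     return ''.join(result)
-- ===== SOURCE B (Python) =====
-- def extract_capitals_with_following(s, n=3):
--     if not any(c.isupper() for c in s):
--         return s
--     out = []
--     k = 0
--     for c in s:
--         if c.isupper():
--             k = n
--         if k > 0:
--             out.append(c)
--             k -= 1
--     return ''.join(out)
-- ===== Notes on version B (the rewrite author's own statement) =====
-- stated objective: simpler
-- what changed: Replaces A's two-phase algorithm (collect the list of uppercase positions, then slice between consecutive ones with min) by a single pass over the characters with one integer countdown counter, reset to n at each uppercase letter, that emits a character while positive.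
-- intended difference: For n < 0 on strings whose length exceeds -n and with an uppercase letter among the first -n characters, A's right slice bound left+n is negative, so Python slice wraparound makes A return characters running up to position len(s)+n from each such uppercase position, while B returns the empty string (a non-positive count emits nothing), which is the intended behaviour of a bounded-length extraction. — e.g. on extract_capitals_with_following("CA", -1): A returns "C", B returns ""
import Mathlib
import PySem

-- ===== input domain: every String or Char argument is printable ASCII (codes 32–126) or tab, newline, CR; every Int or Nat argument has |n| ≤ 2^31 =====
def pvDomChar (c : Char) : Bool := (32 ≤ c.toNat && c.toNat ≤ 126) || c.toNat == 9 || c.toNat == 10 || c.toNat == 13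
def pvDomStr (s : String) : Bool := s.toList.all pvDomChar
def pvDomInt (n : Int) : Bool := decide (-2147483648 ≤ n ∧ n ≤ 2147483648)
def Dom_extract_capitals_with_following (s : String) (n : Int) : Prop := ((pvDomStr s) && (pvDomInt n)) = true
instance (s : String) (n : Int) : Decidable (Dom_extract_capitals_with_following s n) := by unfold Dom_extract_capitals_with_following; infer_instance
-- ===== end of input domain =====

-- B replaces A's two-phase "collect uppercase indices, then slice between consecutive ones"
-- by a single pass with a countdown counter reset at each uppercase letter (objective: simpler).

-- ===== PORT A =====
def extract_capitals_with_following (s : String) (n : Int) : String :=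
  let l := s.toList
  let capitals : List Int :=
    (PySem.List.pyRange 0 (l.length : Int) 1).foldl
      (fun caps i =>
        if PySem.Chars.isupper (PySem.List.pyGetD l i ' ') = true then caps ++ [i] else caps) []
  if capitals.length == 0 then s
  else
    let capitals2 := capitals ++ [(l.length : Int)]
    let result : List (List Char) :=
      (PySem.List.pyRange 0 ((capitals2.length : Int) - 1) 1).foldl
        (fun res idx =>
          let left := PySem.List.pyGetD capitals2 idx 0
          let right := min (left + n) (PySem.List.pyGetD capitals2 (idx + 1) 0)
          res ++ [PySem.List.slice l (some left) (some right)]) []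
    String.ofList (PySem.Chars.join [] result)

-- ===== PORT B =====
def extract_capitals_with_following_alt (s : String) (n : Int) : String :=
  if !(s.toList.any (fun c => PySem.Chars.isupper c)) then s
  else
    let st := s.toList.foldl
      (fun (st : Int × List Char) c =>
        let k := if PySem.Chars.isupper c then n else st.1
        if 0 < k then (k - 1, st.2 ++ [c]) else (k, st.2)) ((0 : Int), ([] : List Char))
    String.ofList st.2

-- ===== PRECONDITION & SPEC =====
-- For n < 0 on strings whose length exceeds -n and with an uppercase letter among the first -n
-- characters, A's right slice bound left+n is negative, so Python slice wraparound makes A return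
-- characters running up to position len(s)+n from each such uppercase position, while B returns the
-- empty string (a non-positive count emits nothing), which is the intended behaviour of a
-- bounded-length extraction.
def D_extract_capitals_with_following (s : String) (n : Int) : Prop :=
  n < 0 ∧ 0 < (s.toList.length : Int) + n ∧
    ∃ i < s.toList.length, ((i : Int) < -n ∧ PySem.Chars.isupper (s.toList.getD i ' ') = true)
instance (s : String) (n : Int) : Decidable (D_extract_capitals_with_following s n) := by
  unfold D_extract_capitals_with_following; infer_instance

def Spec_extract_capitals_with_following (s : String) (n : Int) (out : String) : Prop :=
  ¬ D_extract_capitals_with_following s n → out = extract_capitals_with_following_alt s n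
instance (s : String) (n : Int) (out : String) : Decidable (Spec_extract_capitals_with_following s n out) := by
  unfold Spec_extract_capitals_with_following; infer_instance

def pvDiffWitness_extract_capitals_with_following : String × Int := ("CA", -1)
def pvDiffWitnessOut_extract_capitals_with_following : String × String := ("C", "")

-- ===== CLAIM (what is proved, stated in full; the proofs are below) =====
def Claim_unchanged_extract_capitals_with_following : Prop :=
  ∀ (s : String) (n : Int), Dom_extract_capitals_with_following s n →
    Spec_extract_capitals_with_following s n (extract_capitals_with_following s n)
def Claim_changed_extract_capitals_with_following : Prop :=
  Dom_extract_capitals_with_following (pvDiffWitness_extract_capitals_with_following.1) (pvDiffWitness_extract_capitals_with_following.2) ∧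
  D_extract_capitals_with_following (pvDiffWitness_extract_capitals_with_following.1) (pvDiffWitness_extract_capitals_with_following.2) ∧
  extract_capitals_with_following (pvDiffWitness_extract_capitals_with_following.1) (pvDiffWitness_extract_capitals_with_following.2) = pvDiffWitnessOut_extract_capitals_with_following.1 ∧
  extract_capitals_with_following_alt (pvDiffWitness_extract_capitals_with_following.1) (pvDiffWitness_extract_capitals_with_following.2) = pvDiffWitnessOut_extract_capitals_with_following.2 ∧
  pvDiffWitnessOut_extract_capitals_with_following.1 ≠ pvDiffWitnessOut_extract_capitals_with_following.2
def Claim_exact_extract_capitals_with_following : Prop :=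
  ∀ (s : String) (n : Int), Dom_extract_capitals_with_following s n →
    D_extract_capitals_with_following s n →
    extract_capitals_with_following s n ≠ extract_capitals_with_following_alt s n

-- ===== LEMMAS AND PROOFS =====

-- positions of the uppercase characters of l, as A's first loop collects them
def capsN (l : List Char) : List Nat :=
  (List.range l.length).filter (fun i => PySem.Chars.isupper (l.getD i ' '))

-- position of the first uppercase character (l.length if there is none)
def fciN : List Char → Nat
  | [] => 0
  | c :: t => if PySem.Chars.isupper c then 0 else fciN t + 1

-- the (left, next) pairs A's second loop slices between
def pairsOf (l : List Char) : List (Int × Int) :=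
  ((capsN l).map (fun i : Nat => (i : Int))).zip
    (((capsN l).map (fun i : Nat => (i : Int))).tail ++ [(l.length : Int)])

def sliceOf (n : Int) (l : List Char) (pq : Int × Int) : List Char :=
  PySem.List.slice l (some pq.1) (some (min (pq.1 + n) pq.2))

def acore (n : Int) (l : List Char) : List Char := (pairsOf l).flatMap (sliceOf n l)

-- B's counter loop, as a recursion over the characters
def midRun (n : Int) : Int → List Char → List Char
  | _, [] => []
  | b, c :: t =>
    let k := if PySem.Chars.isupper c then n else b
    if 0 < k then c :: midRun n (k - 1) t else midRun n k t

theorem capsN_cons (c : Char) (t : List Char) :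
    capsN (c :: t) =
      (if PySem.Chars.isupper c then [0] else []) ++ (capsN t).map (· + 1) := by
  unfold capsN
  rw [List.length_cons, List.range_succ_eq_map, List.filter_cons, List.filter_map]
  simp [Function.comp_def]
  split <;> simp

theorem mem_capsN {l : List Char} {i : Nat} :
    i ∈ capsN l ↔ i < l.length ∧ PySem.Chars.isupper (l.getD i ' ') = true := by
  simp [capsN, List.mem_filter, List.mem_range]

theorem headD_capsN (l : List Char) : (capsN l).headD l.length = fciN l := by
  induction l with
  | nil => rfl
  | cons c t ih =>
    rw [capsN_cons, fciN]
    by_cases hc : PySem.Chars.isupper c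
    · simp [hc]
    · simp only [hc, List.length_cons]
      cases h : capsN t with
      | nil => rw [h] at ih; simp only [List.headD_nil] at ih; simp [ih]
      | cons a r => rw [h] at ih; simp at ih; simp [ih]

theorem midRun_nil_of_nonpos {n : Int} (hn : n ≤ 0) :
    ∀ (l : List Char) (b : Int), b ≤ 0 → midRun n b l = [] := by
  intro l
  induction l with
  | nil => intro b _; rfl
  | cons c t ih =>
    intro b hb
    rw [midRun]
    by_cases hc : PySem.Chars.isupper c = true
    · simp only [hc, if_true]
      rw [if_neg (by omega)]
      exact ih n hn
    · simp only [hc, Bool.false_eq_true, if_false]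
      rw [if_neg (by omega)]
      exact ih b hb

-- B's fold produces exactly midRun
theorem foldB (n : Int) :
    ∀ (l : List Char) (b : Int) (acc : List Char),
      (l.foldl
        (fun (st : Int × List Char) c =>
          let k := if PySem.Chars.isupper c then n else st.1
          if 0 < k then (k - 1, st.2 ++ [c]) else (k, st.2)) (b, acc)).2
      = acc ++ midRun n b l := by
  intro l
  induction l with
  | nil => intro b acc; simp [midRun]
  | cons c t ih =>
    intro b acc
    rw [List.foldl_cons, midRun]
    by_cases h : 0 < (if PySem.Chars.isupper c then n else b)
    · simp only [h, if_true]
      rw [ih]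
      simp
    · simp only [h, if_false]
      rw [ih]

theorem slice_shift (c : Char) (t : List Char) {p m : Int} (hp : 0 ≤ p) (hm : 0 ≤ m) :
    PySem.List.slice (c :: t) (some (p + 1)) (some (m + 1)) =
      PySem.List.slice t (some p) (some m) := by
  rw [PySem.List.slice_toNat _ (by omega) (by omega), PySem.List.slice_toNat _ hp hm]
  have h1 : (p + 1).toNat = p.toNat + 1 := by omega
  have h2 : (m + 1).toNat - (p + 1).toNat = m.toNat - p.toNat := by omega
  rw [h1]
  have h2' : (m + 1).toNat - (p.toNat + 1) = m.toNat - p.toNat := by omega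
  rw [h2', List.drop_succ_cons]

theorem shiftPairs (cs : List Int) (L : Int) :
    (cs.map (· + 1)).zip ((cs.map (· + 1)).tail ++ [L + 1]) =
      (cs.zip (cs.tail ++ [L])).map (fun pq => (pq.1 + 1, pq.2 + 1)) := by
  have htail : (cs.map (· + 1)).tail = cs.tail.map (· + 1) := by
    cases cs <;> simp
  rw [htail]
  have : ([L + 1] : List Int) = [L].map (· + 1) := by simp
  rw [this, ← List.map_append, List.zip_map]
  rfl

theorem pairsOf_cons_not {c : Char} (t : List Char) (hc : PySem.Chars.isupper c = false) :
    pairsOf (c :: t) = (pairsOf t).map (fun pq => (pq.1 + 1, pq.2 + 1)) := by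
  unfold pairsOf
  rw [capsN_cons, hc]
  simp only [Bool.false_eq_true, if_false, List.nil_append]
  have hmm : ((capsN t).map (fun i : Nat => i + 1)).map (fun i : Nat => (i : Int))
      = ((capsN t).map (fun i : Nat => (i : Int))).map (fun j : Int => j + 1) := by
    simp only [List.map_map]
    apply List.map_congr_left
    intro a _
    simp [Function.comp]
  rw [hmm]
  have hL : ((c :: t).length : Int) = (t.length : Int) + 1 := by
    rw [List.length_cons]; push_cast; ring
  rw [hL, shiftPairs]

theorem pairsOf_cons_up {c : Char} (t : List Char) (hc : PySem.Chars.isupper c = true) :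
    pairsOf (c :: t) =
      ((0 : Int), ((fciN t : Int) + 1)) :: (pairsOf t).map (fun pq => (pq.1 + 1, pq.2 + 1)) := by
  unfold pairsOf
  rw [capsN_cons, hc]
  simp only [if_true, List.cons_append, List.nil_append, List.map_cons, Nat.cast_zero]
  have hmm : ((capsN t).map (fun i : Nat => i + 1)).map (fun i : Nat => (i : Int))
      = ((capsN t).map (fun i : Nat => (i : Int))).map (fun j : Int => j + 1) := by
    simp only [List.map_map]
    apply List.map_congr_left
    intro a _
    simp [Function.comp]
  rw [hmm]
  have hL : ((c :: t).length : Int) = (t.length : Int) + 1 := by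
    rw [List.length_cons]; push_cast; ring
  rw [hL]
  have hfci := headD_capsN t
  cases h : capsN t with
  | nil =>
    rw [h] at hfci; simp only [List.headD_nil] at hfci
    simp [h, ← hfci]
  | cons a r =>
    rw [h] at hfci; simp only [List.headD_cons] at hfci
    simp only [List.map_cons, List.tail_cons, List.cons_append]
    rw [← hfci, List.zip_cons_cons]
    congr 1
    have hs := shiftPairs ((a : Int) :: List.map (fun i : Nat => (i : Int)) r) (t.length : Int)
    simp only [List.map_cons, List.tail_cons] at hs
    exact hs

theorem mem_pairsOf {l : List Char} {p q : Int} (h : (p, q) ∈ pairsOf l) :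
    0 ≤ p ∧ p < (l.length : Int) ∧ PySem.Chars.isupper (l.getD p.toNat ' ') = true ∧ 0 ≤ q := by
  obtain ⟨hp, hq⟩ := List.of_mem_zip h
  simp only [List.mem_map] at hp
  obtain ⟨i, hi, rfl⟩ := hp
  rw [mem_capsN] at hi
  refine ⟨by positivity, by exact_mod_cast hi.1, by simpa using hi.2, ?_⟩
  rcases List.mem_append.mp hq with h1 | h2
  · have := List.mem_of_mem_tail h1
    simp only [List.mem_map] at this
    obtain ⟨j, _, rfl⟩ := this
    positivity
  · simp at h2; omega

theorem sliceOf_empty {n p q : Int} {l : List Char}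
    (hp : 0 ≤ p) (hplen : p < (l.length : Int)) (hq : 0 ≤ q) (hn : n ≤ 0)
    (hcase : 0 ≤ p + n ∨ (l.length : Int) + n ≤ 0) : sliceOf n l (p, q) = [] := by
  unfold sliceOf
  by_cases hm : 0 ≤ min (p + n) q
  · rw [PySem.List.slice_toNat _ hp hm]
    have : (min (p + n) q).toNat - p.toNat = 0 := by omega
    rw [this, List.take_zero]
  · have hlen : (l.length : Int) + n ≤ 0 := by rcases hcase with h | h <;> omega
    have hlz : (PySem.List.slice l (some p) (some (min (p + n) q))).length = 0 := by
      rw [PySem.List.length_slice]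
      simp only [PySem.List.clampIdx]
      split_ifs <;> omega
    exact List.eq_nil_of_length_eq_zero hlz

theorem acore_nil (n : Int) : acore n [] = [] := rfl

theorem acore_cons_not {c : Char} {n : Int} (t : List Char)
    (hc : PySem.Chars.isupper c = false) (hn : 0 < n) :
    acore n (c :: t) = acore n t := by
  unfold acore
  rw [pairsOf_cons_not t hc, List.flatMap_map]
  apply List.flatMap_congr  -- may not exist; fallback below
  intro pq hpq
  obtain ⟨p, q⟩ := pq
  obtain ⟨h0, _, _, hq0⟩ := mem_pairsOf hpq
  simp only [sliceOf]
  have hmin : min (p + 1 + n) (q + 1) = min (p + n) q + 1 := by omega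
  rw [hmin]
  exact slice_shift c t (by omega) (by omega)

theorem acore_cons_up {c : Char} {n : Int} (t : List Char)
    (hc : PySem.Chars.isupper c = true) (hn : 0 < n) :
    acore n (c :: t) =
      PySem.List.slice (c :: t) (some 0) (some (min n ((fciN t : Int) + 1))) ++ acore n t := by
  unfold acore
  rw [pairsOf_cons_up t hc, List.flatMap_cons, List.flatMap_map]
  congr 1
  · simp [sliceOf]
  · apply List.flatMap_congr
    intro pq hpq
    obtain ⟨p, q⟩ := pq
    obtain ⟨h0, _, _, hq0⟩ := mem_pairsOf hpq
    simp only [sliceOf]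
    have hmin : min (p + 1 + n) (q + 1) = min (p + n) q + 1 := by omega
    rw [hmin]
    exact slice_shift c t (by omega) (by omega)

theorem key {n : Int} (hn : 0 < n) :
    ∀ (l : List Char) (b : Int),
      midRun n b l = List.take (min b (fciN l : Int)).toNat l ++ acore n l := by
  intro l
  induction l with
  | nil => intro b; simp [midRun, acore_nil]
  | cons c t ih =>
    intro b
    rw [midRun]
    by_cases hc : PySem.Chars.isupper c
    · simp only [hc, if_true, hn, fciN]
      have hfz : (min b ((0 : Nat) : Int)).toNat = 0 := by omega
      rw [acore_cons_up t hc hn, ih (n - 1)]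
      have hm : 0 ≤ min n ((fciN t : Int) + 1) := by
        have : (0 : Int) ≤ (fciN t : Int) := by positivity
        omega
      rw [PySem.List.slice_zero_start, PySem.List.slice_to _ hm]
      have hpos : (min n ((fciN t : Int) + 1)).toNat = (min (n - 1) (fciN t : Int)).toNat + 1 := by
        omega
      rw [hfz, hpos, List.take_zero, List.take_succ_cons, List.nil_append, List.cons_append]
    · have hc' : PySem.Chars.isupper c = false := by simpa using hc
      simp only [hc', Bool.false_eq_true, if_false]
      rw [acore_cons_not t hc' hn]
      have hfci : fciN (c :: t) = fciN t + 1 := by rw [fciN]; simp [hc']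
      rw [hfci]
      by_cases hb : 0 < b
      · simp only [hb, if_true]
        rw [ih (b - 1)]
        have h1 : (min b ((fciN t + 1 : Nat) : Int)).toNat
            = (min (b - 1) (fciN t : Int)).toNat + 1 := by push_cast; omega
        rw [h1, List.take_succ_cons, List.cons_append]
      · simp only [hb, if_false]
        rw [ih b]
        have h1 : (min b ((fciN t + 1 : Nat) : Int)).toNat = 0 := by push_cast; omega
        have h2 : (min b (fciN t : Int)).toNat = 0 := by omega
        rw [h1, h2, List.take_zero, List.take_zero]

theorem join_nil_flatten (xss : List (List Char)) : PySem.Chars.join [] xss = xss.flatten := by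
  show List.intercalate [] xss = xss.flatten
  induction xss with
  | nil => rfl
  | cons x t ih =>
    cases t with
    | nil => simp [List.intercalate, List.intersperse]
    | cons y r => simp_all [List.intercalate, List.intersperse]

theorem map_range_adjacent (g : Int → Int → List Char) :
    ∀ (ys : List Int),
      (List.range (ys.length - 1)).map (fun i => g (ys.getD i 0) (ys.getD (i + 1) 0)) =
        (ys.zip ys.tail).map (fun pq => g pq.1 pq.2) := by
  intro ys
  induction ys with
  | nil => rfl
  | cons y t ih =>
    cases t with
    | nil => rfl
    | cons z r =>
      simp only [List.length_cons, Nat.add_sub_cancel] at *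
      rw [List.range_succ_eq_map, List.map_cons, List.map_map, List.tail_cons,
        List.zip_cons_cons, List.map_cons]
      simp only [List.getD_cons_zero, List.getD_cons_succ]
      have ih' := ih
      rw [List.tail_cons] at ih'
      have htail : List.map ((fun i => g ((y :: z :: r).getD i 0) ((z :: r).getD i 0)) ∘ Nat.succ) (List.range r.length)
          = List.map (fun pq => g pq.1 pq.2) ((z :: r).zip r) := by
        rw [← ih']
        apply List.map_congr_left
        intro a _
        simp only [Function.comp_apply, Nat.succ_eq_add_one, List.getD_cons_succ]
      rw [htail]


theorem zip_append_last (cs : List Int) (L : Int) :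
    (cs ++ [L]).zip ((cs ++ [L]).tail) = cs.zip (cs.tail ++ [L]) := by
  induction cs with
  | nil => rfl
  | cons a r ih =>
    cases r with
    | nil => rfl
    | cons b u =>
      simp only [List.cons_append, List.tail_cons, List.zip_cons_cons] at *
      rw [ih]

theorem capsN_eq_nil_iff (l : List Char) :
    capsN l = [] ↔ l.any (fun c => PySem.Chars.isupper c) = false := by
  rw [List.any_eq_false]
  unfold capsN
  rw [List.filter_eq_nil_iff]
  constructor
  · intro h c hc
    obtain ⟨i, hi, rfl⟩ := List.mem_iff_getElem.mp hc
    have := h i (List.mem_range.mpr hi)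
    rw [List.getD_eq_getElem l ' ' hi] at this
    simpa using this
  · intro h i hi
    rw [List.mem_range] at hi
    rw [List.getD_eq_getElem l ' ' hi]
    simp only [Bool.not_eq_true]
    have := h _ (List.getElem_mem hi)
    simpa using this

theorem capitals_eq (l : List Char) :
    ((PySem.List.pyRange 0 (l.length : Int) 1).foldl
      (fun caps i =>
        if PySem.Chars.isupper (PySem.List.pyGetD l i ' ') = true then caps ++ [i] else caps) [])
    = (capsN l).map (fun i : Nat => (i : Int)) := by
  rw [PySem.List.foldl_append_if _ (fun i => i)]
  rw [PySem.List.pyRange_one]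
  simp only [Int.sub_zero, Int.toNat_natCast, zero_add, List.nil_append, List.map_id']
  rw [List.filter_map]
  unfold capsN
  congr 1
  apply List.filter_congr
  intro i _
  simp [Function.comp, PySem.List.pyGetD_natCast]

theorem A_eq (s : String) (n : Int) :
    extract_capitals_with_following s n =
      if capsN s.toList = [] then s else String.ofList (acore n s.toList) := by
  unfold extract_capitals_with_following
  simp only [capitals_eq]
  by_cases hcaps : capsN s.toList = []
  · simp [hcaps]
  · rw [if_neg (by simpa using hcaps), if_neg hcaps]
    rw [PySem.List.foldl_append_singleton_eq_map
      (fun idx =>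
        PySem.List.slice s.toList (some (PySem.List.pyGetD ((capsN s.toList).map (fun i : Nat => (i : Int)) ++ [(s.toList.length : Int)]) idx 0))
          (some (min (PySem.List.pyGetD ((capsN s.toList).map (fun i : Nat => (i : Int)) ++ [(s.toList.length : Int)]) idx 0 + n)
            (PySem.List.pyGetD ((capsN s.toList).map (fun i : Nat => (i : Int)) ++ [(s.toList.length : Int)]) (idx + 1) 0))))]
    rw [List.nil_append, join_nil_flatten]
    congr 1
    set cs := (capsN s.toList).map (fun i : Nat => (i : Int)) with hcs
    set ys := cs ++ [(s.toList.length : Int)] with hys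
    have hlen : ((ys.length : Int) - 1).toNat = ys.length - 1 := by omega
    rw [PySem.List.pyRange_one]
    simp only [Int.sub_zero, hlen, zero_add]
    have hmapped :
        (List.range (ys.length - 1)).map
          (fun k : Nat =>
            PySem.List.slice s.toList (some (PySem.List.pyGetD ys (k : Int) 0))
              (some (min (PySem.List.pyGetD ys (k : Int) 0 + n) (PySem.List.pyGetD ys ((k : Int) + 1) 0))))
        = (List.range (ys.length - 1)).map
          (fun k : Nat =>
            PySem.List.slice s.toList (some (ys.getD k 0))
              (some (min (ys.getD k 0 + n) (ys.getD (k + 1) 0)))) := by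
      apply List.map_congr_left
      intro k _
      have h1 : ((k : Int) + 1) = ((k + 1 : Nat) : Int) := by push_cast; ring
      rw [h1, PySem.List.pyGetD_natCast, PySem.List.pyGetD_natCast]
    rw [List.map_map]
    simp only [Function.comp_def]
    rw [hmapped,
      map_range_adjacent (fun p q => PySem.List.slice s.toList (some p) (some (min (p + n) q))) ys]
    unfold acore pairsOf
    rw [hys, zip_append_last]
    rw [List.flatMap_def]
    rfl

theorem B_eq (s : String) (n : Int) :
    extract_capitals_with_following_alt s n =
      if s.toList.any (fun c => PySem.Chars.isupper c) = false then s
      else String.ofList (midRun n 0 s.toList) := by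
  unfold extract_capitals_with_following_alt
  by_cases h : s.toList.any (fun c => PySem.Chars.isupper c)
  · simp only [h, Bool.not_true, Bool.false_eq_true, if_false]
    rw [if_neg (by simp [h])]
    rw [foldB n s.toList 0 []]
    simp
  · simp only [Bool.not_eq_true] at h
    simp [h]

theorem main_eq (s : String) (n : Int)
    (hnd : ¬ D_extract_capitals_with_following s n) :
    extract_capitals_with_following s n = extract_capitals_with_following_alt s n := by
  rw [A_eq, B_eq]
  by_cases hcaps : capsN s.toList = []
  · rw [if_pos hcaps, if_pos ((capsN_eq_nil_iff _).mp hcaps)]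
  · have hany : s.toList.any (fun c => PySem.Chars.isupper c) = true := by
      by_contra h
      rw [Bool.not_eq_true] at h
      exact hcaps ((capsN_eq_nil_iff _).mpr h)
    rw [if_neg hcaps, if_neg (by simp [hany])]
    congr 1
    rcases (by omega : 0 < n ∨ n ≤ 0) with hn | hn
    · rw [key hn s.toList 0]
      have h0 : (min (0 : Int) (fciN s.toList : Int)).toNat = 0 := by omega
      rw [h0, List.take_zero, List.nil_append]
    · rw [midRun_nil_of_nonpos hn s.toList 0 le_rfl]
      unfold acore
      rw [List.flatMap_eq_nil_iff]
      intro pq hpq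
      obtain ⟨p, q⟩ := pq
      obtain ⟨hp0, hplen, hup, hq0⟩ := mem_pairsOf hpq
      apply sliceOf_empty hp0 hplen hq0 hn
      unfold D_extract_capitals_with_following at hnd
      push_neg at hnd
      rcases (by omega : n = 0 ∨ n < 0) with he | hlt
      · left; omega
      · by_cases hL : (s.toList.length : Int) + n ≤ 0
        · right; exact hL
        · left
          have hstep := hnd hlt (by omega) p.toNat (by omega)
          have hcast : ((p.toNat : Nat) : Int) = p := by omega
          rw [hcast] at hstep
          by_contra hcon
          exact (hstep (by omega)) hup

theorem mem_zip_left {α β : Type} (A : List α) (B : List β)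
    (hlen : A.length ≤ B.length) {x : α} (hx : x ∈ A) : ∃ y, (x, y) ∈ A.zip B := by
  induction A generalizing B with
  | nil => cases hx
  | cons a t ih =>
    cases B with
    | nil => simp at hlen
    | cons b u =>
      rcases List.mem_cons.mp hx with rfl | hx'
      · exact ⟨b, by simp⟩
      · obtain ⟨y, hy⟩ := ih u (by simpa using hlen) hx'
        exact ⟨y, List.mem_cons_of_mem _ hy⟩

-- ===== VERDICT (by name: the statement is the Claim_ definition above) =====
theorem extract_capitals_with_following_spec : Claim_unchanged_extract_capitals_with_following := by
  intro s n _ hnd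
  exact main_eq s n hnd

theorem extract_capitals_with_following_changed : Claim_changed_extract_capitals_with_following := by
  unfold Claim_changed_extract_capitals_with_following; decide

theorem extract_capitals_with_following_tight : Claim_exact_extract_capitals_with_following := by
  intro s n _ hd
  obtain ⟨hn, hlen, i, hilen, hiN, hup⟩ := hd
  have hmem : i ∈ capsN s.toList := mem_capsN.mpr ⟨hilen, hup⟩
  have hcaps : capsN s.toList ≠ [] := by
    intro h; rw [h] at hmem; exact absurd hmem (List.not_mem_nil)
  have hany : s.toList.any (fun c => PySem.Chars.isupper c) = true := by
    by_contra h
    rw [Bool.not_eq_true] at h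
    exact hcaps ((capsN_eq_nil_iff _).mpr h)
  rw [A_eq, B_eq, if_neg hcaps, if_neg (by simp [hany]),
    midRun_nil_of_nonpos (le_of_lt hn) s.toList 0 le_rfl]
  intro heq
  have hceq := congrArg String.toList heq
  rw [String.toList_ofList, String.toList_ofList] at hceq
  have hpos : 0 < (capsN s.toList).length := List.length_pos_of_ne_nil hcaps
  have hcs : (i : Int) ∈ (capsN s.toList).map (fun i : Nat => (i : Int)) :=
    List.mem_map_of_mem hmem
  have hblen : ((capsN s.toList).map (fun i : Nat => (i : Int))).length ≤
      (((capsN s.toList).map (fun i : Nat => (i : Int))).tail ++ [(s.toList.length : Int)]).length := by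
    rw [List.length_append, List.length_tail, List.length_map]
    simp only [List.length_singleton]
    omega
  obtain ⟨q, hpq⟩ := mem_zip_left _ _ hblen hcs
  have hpq' : ((i : Int), q) ∈ pairsOf s.toList := hpq
  have hq0 := (mem_pairsOf hpq').2.2.2
  have hempty := List.flatMap_eq_nil_iff.mp hceq _ hpq'
  unfold sliceOf at hempty
  have hm : min ((i : Int) + n) q = (i : Int) + n := by omega
  rw [hm] at hempty
  have hlz := congrArg List.length hempty
  rw [PySem.List.length_slice] at hlz
  simp only [PySem.List.clampIdx, List.length_nil] at hlz
  split_ifs at hlz <;> omega
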